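-- pv_equiv track=rewrite | github.com/DaveMufadhal/DAST | scanner/reporting.py | _group_by_severity
-- ===== SOURCE A (Python) =====
-- def _group_by_severity(findings):
--     """Group findings by severity level"""
--     grouped = {
--         'critical': [],
--         'high': [],
--         'medium': [],
--         'low': [],
--         'info': []
--     }
--
--     for finding in findings:
--         score = finding.get('severity_score', 0)
--         if score >= 9:
--             grouped['critical'].append(finding)
--         elif score >= 7:
--             grouped['high'].append(finding)
--         elif score >= 4:
--             grouped['medium'].append(finding)
--         elif score >= 1:
--             grouped['low'].append(finding)
--         else:
--             grouped['info'].append(finding)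
--
--     return grouped
-- ===== SOURCE B (Python) =====
-- def _group_by_severity(findings):
--     """Group findings by severity level (table-driven label + per-label filter)"""
--     table = [(9, 'critical'), (7, 'high'), (4, 'medium'), (1, 'low')]
--
--     def label_of(finding):
--         score = finding.get('severity_score', 0)
--         for threshold, name in table:
--             if score >= threshold:
--                 return name
--         return 'info'
--
--     labeled = [(label_of(f), f) for f in findings]
--     return {name: [f for lbl, f in labeled if lbl == name]
--             for name in ('critical', 'high', 'medium', 'low', 'info')}
-- ===== Notes on version B (the rewrite author's own statement) =====
-- stated objective: alternative
-- what changed: Replaced the single-pass if/elif chain appending into a mutable dict with a table-driven severity-label function plus one filter pass per bucket (dict comprehension); the buckets are computed independently instead of accumulated.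
import Mathlib
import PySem

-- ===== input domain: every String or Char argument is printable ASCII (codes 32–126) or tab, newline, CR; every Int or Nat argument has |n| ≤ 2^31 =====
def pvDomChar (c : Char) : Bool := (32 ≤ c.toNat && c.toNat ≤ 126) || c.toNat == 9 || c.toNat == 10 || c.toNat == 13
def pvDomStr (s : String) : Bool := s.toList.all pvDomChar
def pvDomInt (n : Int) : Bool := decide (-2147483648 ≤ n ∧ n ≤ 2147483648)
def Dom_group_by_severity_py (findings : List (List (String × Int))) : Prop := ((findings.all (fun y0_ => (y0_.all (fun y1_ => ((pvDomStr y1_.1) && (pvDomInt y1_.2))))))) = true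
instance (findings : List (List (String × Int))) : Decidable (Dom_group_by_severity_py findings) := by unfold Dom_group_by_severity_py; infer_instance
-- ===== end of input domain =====

-- B replaces A's single accumulating pass (if/elif chain appending into a mutable dict) with a
-- table-driven label function and one independent filter pass per bucket; equal return values (alternative, not faster).

-- finding.get('severity_score', 0): first-match lookup in the association list (exact: a Python
-- dict is represented as its items in insertion order with unique keys)
def pvScore (f : List (String × Int)) : Int :=
  match f.find? (fun p => p.1 == "severity_score") with
  | some p => p.2
  | none => 0

-- ===== PORT A =====
-- grouped[k].append(finding): the grouped dict has fixed, distinct, always-present keys, so it is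
-- ported by hand as an association list updated in place at key k (exact on this use).
def pvAppendAt (g : List (String × List (List (String × Int)))) (k : String)
    (x : List (String × Int)) : List (String × List (List (String × Int))) :=
  match g with
  | [] => []
  | (k', v) :: rest => if k' == k then (k', v ++ [x]) :: rest else (k', v) :: pvAppendAt rest k x

def pvStep (g : List (String × List (List (String × Int)))) (f : List (String × Int)) :
    List (String × List (List (String × Int))) :=
  let score := pvScore f
  if score ≥ 9 then pvAppendAt g "critical" f
  else if score ≥ 7 then pvAppendAt g "high" f
  else if score ≥ 4 then pvAppendAt g "medium" f
  else if score ≥ 1 then pvAppendAt g "low" f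
  else pvAppendAt g "info" f

def group_by_severity_py (findings : List (List (String × Int))) : List (String × List (List (String × Int))) :=
  let grouped : List (String × List (List (String × Int))) :=
    [("critical", []), ("high", []), ("medium", []), ("low", []), ("info", [])]
  findings.foldl pvStep grouped

-- ===== PORT B =====
def pvTable : List (Int × String) := [(9, "critical"), (7, "high"), (4, "medium"), (1, "low")]

def pvFirstLabel (score : Int) : List (Int × String) → String
  | [] => "info"
  | (t, name) :: rest => if score ≥ t then name else pvFirstLabel score rest

def pvLabelOf (f : List (String × Int)) : String :=
  pvFirstLabel (pvScore f) pvTable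

def group_by_severity_py_alt (findings : List (List (String × Int))) : List (String × List (List (String × Int))) :=
  let labeled := findings.map (fun f => (pvLabelOf f, f))
  ["critical", "high", "medium", "low", "info"].map
    (fun name => (name, (labeled.filter (fun p => p.1 == name)).map (·.2)))

-- ===== PRECONDITION & SPEC =====
def Spec_group_by_severity_py (findings : List (List (String × Int))) (out : List (String × List (List (String × Int)))) : Prop := out = group_by_severity_py_alt findings
instance (findings : List (List (String × Int))) (out : List (String × List (List (String × Int)))) : Decidable (Spec_group_by_severity_py findings out) := by unfold Spec_group_by_severity_py; infer_instance

-- ===== CLAIM (what is proved, stated in full; the proofs are below) =====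
def Claim_equal_group_by_severity_py : Prop := ∀ (findings : List (List (String × Int))), Dom_group_by_severity_py findings → Spec_group_by_severity_py findings (group_by_severity_py findings)

-- ===== LEMMAS AND PROOFS =====

-- Loop invariant: folding A's step over fs, started from buckets c/h/m/l/i, appends to each bucket
-- exactly the findings whose B-label is that bucket's name, in order.
theorem pv_group_inv (fs : List (List (String × Int)))
    (c h m l i : List (List (String × Int))) :
    fs.foldl pvStep [("critical", c), ("high", h), ("medium", m), ("low", l), ("info", i)]
    = [("critical", c ++ fs.filter (fun f => pvLabelOf f == "critical")),
       ("high", h ++ fs.filter (fun f => pvLabelOf f == "high")),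
       ("medium", m ++ fs.filter (fun f => pvLabelOf f == "medium")),
       ("low", l ++ fs.filter (fun f => pvLabelOf f == "low")),
       ("info", i ++ fs.filter (fun f => pvLabelOf f == "info"))] := by
  induction fs generalizing c h m l i with
  | nil => simp
  | cons f fs ih =>
    simp only [List.foldl_cons]
    by_cases h9 : pvScore f ≥ 9
    · have hl : pvLabelOf f = "critical" := by simp [pvLabelOf, pvFirstLabel, pvTable, h9]
      simp [pvStep, pvAppendAt, h9, ih, hl]
    · by_cases h7 : pvScore f ≥ 7
      · have hl : pvLabelOf f = "high" := by simp [pvLabelOf, pvFirstLabel, pvTable, h9, h7]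
        simp [pvStep, pvAppendAt, h9, h7, ih, hl]
      · by_cases h4 : pvScore f ≥ 4
        · have hl : pvLabelOf f = "medium" := by simp [pvLabelOf, pvFirstLabel, pvTable, h9, h7, h4]
          simp [pvStep, pvAppendAt, h9, h7, h4, ih, hl]
        · by_cases h1 : pvScore f ≥ 1
          · have hl : pvLabelOf f = "low" := by simp [pvLabelOf, pvFirstLabel, pvTable, h9, h7, h4, h1]
            simp [pvStep, pvAppendAt, h9, h7, h4, h1, ih, hl]
          · have hl : pvLabelOf f = "info" := by simp [pvLabelOf, pvFirstLabel, pvTable, h9, h7, h4, h1]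
            simp [pvStep, pvAppendAt, h9, h7, h4, h1, ih, hl]

-- Each of B's buckets, computed from the precomputed (label, finding) pairs, is the plain filter by label.
theorem pv_alt_bucket (findings : List (List (String × Int))) (name : String) :
    ((findings.map (fun f => (pvLabelOf f, f))).filter (fun p => p.1 == name)).map (·.2)
    = findings.filter (fun f => pvLabelOf f == name) := by
  induction findings with
  | nil => simp
  | cons f fs ih =>
    by_cases hl : pvLabelOf f == name <;> simp [hl, ih]

-- ===== VERDICT (by name: the statement is the Claim_ definition above) =====
theorem group_by_severity_py_spec : Claim_equal_group_by_severity_py := by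
  intro findings _
  unfold Spec_group_by_severity_py group_by_severity_py group_by_severity_py_alt
  rw [pv_group_inv]
  simp [pv_alt_bucket]
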